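-- pv_equiv track=rewrite | github.com/yannisduvignau/fcsc-2025 | intro/touillette/demeler_flag.py | demeler_flag
-- ===== SOURCE A (Python) =====
-- def demeler_flag(scrambled):
--     """
--     Démêle un flag qui a été mélangé par le script touillette.py.
--
--     Args:
--         flag_melange (str): La chaîne de caractères du flag mélangé.
--
--     Returns:
--         str: Le flag original.
--     """
--     n = len(scrambled)
--     if n != 64:
--         return "La longueur du flag mélangé n'est pas de 64 caractères."
--
--
--     # Étape 1 : Inverser x[1::2] + x[0::2]
--     x = [""] * 64
--     x[1::2] = list(scrambled[:32])
--     x[0::2] = list(scrambled[32:])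
--
--     # Étape 2 : Inverser le mélange fait par:
--     # x = flag[-8::-8] + flag[-7::-8] + ... + flag[-1::-8]
--
--     # Pour chaque i de 0 à 7, flag[-(i+1):: -8] prend les positions:
--     # 63 - i, 55 - i, 47 - i, ..., 7 - i
--
--     # Créons une map de position : position du flag → index dans x
--     flag_to_x = {}
--     for i in range(8):
--         for j in range(8):
--             flag_index = (7 - j) * 8 + i  # ceci donne les index parcourus dans le flag
--             x_index = i * 8 + j
--             flag_to_x[flag_index] = x_index
--
--     # Reconstruire le flag
--     flag = [""] * 64
--     for flag_index, x_index in flag_to_x.items():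
--         flag[flag_index] = x[x_index]
--
--     return "".join(flag)
-- ===== SOURCE B (Python) =====
-- def demeler_flag(scrambled):
--     if len(scrambled) != 64:
--         return "La longueur du flag mélangé n'est pas de 64 caractères."
--     out = []
--     for p in range(64):
--         k = (p % 8) * 8 + (7 - p // 8)   # index in the intermediate list x
--         src = (k - 1) // 2 if k % 2 == 1 else 32 + k // 2
--         out.append(scrambled[src])
--     return "".join(out)
-- ===== Notes on version B (the rewrite author's own statement) =====
-- stated objective: simpler
-- what changed: B composes the two inverse-permutation stages into one closed-form source-index formula per output position, building the result in a single pass with no intermediate list x and no position dict.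
import Mathlib
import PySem

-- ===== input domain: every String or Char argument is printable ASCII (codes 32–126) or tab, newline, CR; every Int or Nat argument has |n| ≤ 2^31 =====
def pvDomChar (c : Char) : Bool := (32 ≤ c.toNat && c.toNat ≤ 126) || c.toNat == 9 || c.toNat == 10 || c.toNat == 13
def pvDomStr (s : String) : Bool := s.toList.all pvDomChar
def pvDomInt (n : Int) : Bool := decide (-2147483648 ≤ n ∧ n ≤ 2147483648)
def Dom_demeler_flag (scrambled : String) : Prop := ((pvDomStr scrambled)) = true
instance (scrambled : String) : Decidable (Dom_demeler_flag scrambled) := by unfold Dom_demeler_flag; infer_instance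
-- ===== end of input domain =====

-- B composes the two unscrambling stages of A into one direct source-index formula per
-- output position (no intermediate list x, no position dict); objective: simpler.
-- Both ports work on scrambled.toList (PySem.Chars is the List Char model of Python str);
-- a Python 1-char string is represented as a singleton List Char, so each port first maps
-- cs to its list of 1-char strings and its index-shuffling pipeline is generic in the
-- element type (it never inspects the characters, exactly like the Python).

-- ===== PORT A =====
-- Python slice assignment x[1::2] = vals (resp. x[0::2] = vals) has no PySem primitive;
-- it is ported by hand, step for step: write vals[m] at position start + 2*m.
-- Exact here: both sides have matching length 32, all written positions are in range.
def pvAssignStride {α : Type} (x : List α) (start : Nat) (vals : List α) : List α :=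
  vals.zipIdx.foldl (fun acc vm => acc.set (start + 2 * vm.2) vm.1) x

-- A's whole index shuffle, element-type generic (d is the "" placeholder of the Python lists):
-- x = [d]*64; x[1::2] = xs[:32]; x[0::2] = xs[32:]; the two nested range(8) loops building
-- flag_to_x; flag = [d]*64; for flag_index, x_index in flag_to_x.items(): flag[flag_index] = x[x_index].
-- (both indices are always in 0..63, so pySetD / pyGetD are exact — no IndexError is possible)
def pvPipeA {α : Type} (d : α) (xs : List α) : List α :=
  let x0 := List.replicate 64 d
  let x1 := pvAssignStride x0 1 (PySem.List.slice xs none (some 32))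
  let x  := pvAssignStride x1 0 (PySem.List.slice xs (some 32) none)
  let flag_to_x : PySem.Dict Int Int :=
    (PySem.List.pyRange 0 8 1).foldl (fun d' i =>
      (PySem.List.pyRange 0 8 1).foldl (fun d'' j =>
        d''.insert ((7 - j) * 8 + i) (i * 8 + j)) d') PySem.Dict.empty
  flag_to_x.items.foldl (fun fl p => PySem.List.pySetD fl p.1 (PySem.List.pyGetD x p.2 d)) (List.replicate 64 d)

def demeler_flag (scrambled : String) : String :=
  let cs := scrambled.toList
  if PySem.Chars.len cs ≠ 64 then "La longueur du flag mélangé n'est pas de 64 caractères." else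
  String.ofList (PySem.Chars.join [] (pvPipeA [] (cs.map (fun c => [c]))))

-- ===== PORT B =====
-- B's single pass: for each p in range(64) append scrambled[src(p)]; element-type generic
-- for the same reason (src is always in 0..63 here, so the getD default is never used).
def pvSrc (p : Int) : Int :=
  let k := PySem.Int.mod p 8 * 8 + (7 - PySem.Int.floordiv p 8)
  if PySem.Int.mod k 2 == 1 then PySem.Int.floordiv (k - 1) 2 else 32 + PySem.Int.floordiv k 2

def pvPipeB {α : Type} (xs : List α) (d : α) : List α :=
  (PySem.List.pyRange 0 64 1).foldl (fun acc p => acc ++ [(PySem.List.pyGet? xs (pvSrc p)).getD d]) []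

def demeler_flag_alt (scrambled : String) : String :=
  let cs := scrambled.toList
  if PySem.Chars.len cs ≠ 64 then "La longueur du flag mélangé n'est pas de 64 caractères." else
  String.ofList (PySem.Chars.join [] (pvPipeB (cs.map (fun c => [c])) []))

-- ===== PRECONDITION & SPEC =====
def Spec_demeler_flag (scrambled : String) (out : String) : Prop := out = demeler_flag_alt scrambled
instance (scrambled : String) (out : String) : Decidable (Spec_demeler_flag scrambled out) := by unfold Spec_demeler_flag; infer_instance

-- ===== CLAIM (what is proved, stated in full; the proofs are below) =====
def Claim_equal_demeler_flag : Prop := ∀ (scrambled : String), Dom_demeler_flag scrambled → Spec_demeler_flag scrambled (demeler_flag scrambled)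

-- ===== LEMMAS AND PROOFS =====
-- The two pipelines never inspect their elements, so they commute with List.map; the proof
-- transfers both to the concrete token list (List.range 64).map some, where they agree by decide.

theorem pv_get?_map {α β : Type} (f : α → β) (xs : List α) (i : Int) :
    PySem.List.pyGet? (xs.map f) i = (PySem.List.pyGet? xs i).map f := by
  simp [PySem.List.pyGet?, PySem.List.pyIdx?]

theorem pv_getD_map {α β : Type} (f : α → β) (xs : List α) (i : Int) (d : α) :
    PySem.List.pyGetD (xs.map f) i (f d) = f (PySem.List.pyGetD xs i d) := by
  simp only [PySem.List.pyGetD, pv_get?_map]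
  cases PySem.List.pyGet? xs i <;> rfl

theorem pv_set?_map {α β : Type} (f : α → β) (xs : List α) (i : Int) (v : α) :
    PySem.List.pySet? (xs.map f) i (f v) = (PySem.List.pySet? xs i v).map (List.map f) := by
  simp [PySem.List.pySet?, PySem.List.pyIdx?]
  split_ifs <;> simp [List.map_set]

theorem pv_setD_map {α β : Type} (f : α → β) (xs : List α) (i : Int) (v : α) :
    PySem.List.pySetD (xs.map f) i (f v) = (PySem.List.pySetD xs i v).map f := by
  simp only [PySem.List.pySetD, pv_set?_map]
  cases PySem.List.pySet? xs i v <;> rfl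

theorem pv_slice_map {α β : Type} (f : α → β) (xs : List α) (a b : Option Int) :
    PySem.List.slice (xs.map f) a b = (PySem.List.slice xs a b).map f := by
  simp [PySem.List.slice, List.map_take, List.map_drop]

theorem pv_stride_map {α β : Type} (f : α → β) (x : List α) (s : Nat) (vals : List α) :
    pvAssignStride (x.map f) s (vals.map f) = (pvAssignStride x s vals).map f := by
  unfold pvAssignStride
  rw [show (vals.map f).zipIdx = vals.zipIdx.map (fun p => (f p.1, p.2)) by
    simp [List.zipIdx_map, Prod.map]]
  induction vals.zipIdx generalizing x with
  | nil => rfl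
  | cons p l ih => simpa [List.map_set] using ih (x.set (s + 2 * p.2) p.1)

theorem pv_foldSet_map {α β : Type} (f : α → β) (d : α) (x : List α)
    (ps : List (Int × Int)) (fl : List α) :
    ps.foldl (fun fl p => PySem.List.pySetD fl p.1 (PySem.List.pyGetD (x.map f) p.2 (f d))) (fl.map f)
      = (ps.foldl (fun fl p => PySem.List.pySetD fl p.1 (PySem.List.pyGetD x p.2 d)) fl).map f := by
  induction ps generalizing fl with
  | nil => rfl
  | cons p ps ih =>
    simp only [List.foldl_cons]
    rw [pv_getD_map, pv_setD_map]
    exact ih _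

theorem pv_pipeA_map {α β : Type} (f : α → β) (d : α) (xs : List α) :
    pvPipeA (f d) (xs.map f) = (pvPipeA d xs).map f := by
  simp only [pvPipeA, pv_slice_map]
  rw [show List.replicate 64 (f d) = (List.replicate 64 d).map f by simp,
      pv_stride_map, pv_stride_map, pv_foldSet_map]

theorem pv_foldAppend_map {α β : Type} (f : α → β) (g : Int → α) (l : List Int) (acc : List α) :
    l.foldl (fun acc p => acc ++ [f (g p)]) (acc.map f)
      = (l.foldl (fun acc p => acc ++ [g p]) acc).map f := by
  induction l generalizing acc with
  | nil => rfl
  | cons p l ih =>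
    simp only [List.foldl_cons]
    rw [show acc.map f ++ [f (g p)] = (acc ++ [g p]).map f by simp]
    exact ih _

theorem pv_pipeB_map {α β : Type} (f : α → β) (d : α) (xs : List α) :
    pvPipeB (xs.map f) (f d) = (pvPipeB xs d).map f := by
  unfold pvPipeB
  rw [show (fun (acc : List β) (p : Int) => acc ++ [(PySem.List.pyGet? (xs.map f) (pvSrc p)).getD (f d)])
      = (fun (acc : List β) (p : Int) => acc ++ [f ((PySem.List.pyGet? xs (pvSrc p)).getD d)]) from
    funext fun acc => funext fun p => by
      rw [pv_get?_map]
      cases PySem.List.pyGet? xs (pvSrc p) <;> rfl]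
  rw [show ([] : List β) = ([] : List α).map f from rfl]
  exact pv_foldAppend_map f _ _ _

set_option maxRecDepth 40000 in
theorem pv_pipes_agree :
    pvPipeA (none : Option Nat) ((List.range 64).map some)
      = pvPipeB ((List.range 64).map some) (none : Option Nat) := by decide

theorem pv_list_as_range {γ : Type} (cs : List Char) (h : cs.length = 64) (w : Char → γ) :
    cs.map w = (List.range 64).map (fun i => w (cs.getD i ' ')) := by
  apply List.ext_getElem
  · simp [h]
  · intro i h1 h2
    simp only [List.length_map, h] at h1
    simp [h, h1]

-- ===== VERDICT (by name: the statement is the Claim_ definition above) =====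
theorem demeler_flag_spec : Claim_equal_demeler_flag := by
  intro s _
  unfold Spec_demeler_flag demeler_flag demeler_flag_alt
  by_cases h : s.toList.length = 64
  · have hn : ¬ (PySem.Chars.len s.toList ≠ 64) := by
      simp [PySem.Chars.len_eq, h]
    rw [if_neg hn, if_neg hn]
    have hx : s.toList.map (fun c => [c])
        = ((List.range 64).map some).map (fun o : Option Nat => o.elim [] (fun i => [s.toList.getD i ' '])) := by
      rw [List.map_map]
      exact pv_list_as_range s.toList h _
    rw [hx]
    have e1 := pv_pipeA_map (fun o : Option Nat => o.elim ([] : List Char) (fun i => [s.toList.getD i ' '])) none ((List.range 64).map some)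
    have e2 := pv_pipeB_map (fun o : Option Nat => o.elim ([] : List Char) (fun i => [s.toList.getD i ' '])) none ((List.range 64).map some)
    rw [show (Option.elim (none : Option Nat) ([] : List Char) (fun i => [s.toList.getD i ' '])) = ([] : List Char) from rfl] at e1 e2
    rw [e1, e2, pv_pipes_agree]
  · have hn : PySem.Chars.len s.toList ≠ 64 := by
      rw [PySem.Chars.len_eq]
      exact fun hc => h (by exact_mod_cast hc)
    rw [if_pos hn, if_pos hn]
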